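-- pv_equiv track=rewrite | github.com/supermt/KVRocks-Rebalancer-cpp | utils/load_balance.py | load_balance
-- ===== SOURCE A (Python) =====
-- def load_balance(slots, num_servers):
--     # Calculate the total access time for all slots
--     total_access_time = sum(slot[1] for slot in slots)
--
--     # Calculate the target access time per server
--     target_access_time = total_access_time / num_servers
--
--     # Initialize the current access time for each server to 0
--     current_access_time = [0] * num_servers
--
--     # Initialize the server assignments for each slot to -1
--     server_assignments = [-1] * len(slots)
--
--     # Sort the slots by access time in descending order
--     sorted_slots = sorted(slots, key=lambda x: x[1], reverse=True)
--
--     # Iterate through each slot and assign it to the least loaded server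
--     for slot in sorted_slots:
--         least_loaded_server = current_access_time.index(min(current_access_time))
--         server_assignments[slots.index(slot)] = least_loaded_server
--         current_access_time[least_loaded_server] += slot[1]
--
--     return server_assignments
-- ===== SOURCE B (Python) =====
-- def load_balance(slots, num_servers):
--     n = len(slots)
--     # first occurrence index of each distinct slot (replaces slots.index scans)
--     first = {}
--     for i, s in enumerate(slots):
--         if s not in first:
--             first[s] = i
--     # priority queue: an ascending sorted list of (load, server) pairs;
--     # the least-loaded server (lowest index on ties) is always queue[0]
--     queue = [(0, i) for i in range(num_servers)]
--     out = [-1] * n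
--     for slot in sorted(slots, key=lambda x: x[1], reverse=True):
--         load, srv = queue[0]
--         out[first[slot]] = srv
--         rest = queue[1:]
--         new = (load + slot[1], srv)
--         # binary search for the insertion point keeping rest sorted (hand-rolled bisect_left)
--         lo, hi = 0, len(rest)
--         while lo < hi:
--             mid = (lo + hi) // 2
--             if rest[mid] < new:
--                 lo = mid + 1
--             else:
--                 hi = mid
--         rest.insert(lo, new)
--         queue = rest
--     return out
-- ===== Notes on version B (the rewrite author's own statement) =====
-- stated objective: alternative
-- what changed: B replaces A's per-slot linear min()+index() scan over server loads with a priority queue kept as an ascending sorted list of (load, server) pairs - pop the head, reinsert the updated pair at its ordered position - and a value-to-first-index dict built once instead of A's repeated slots.index scans.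
import Mathlib
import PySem

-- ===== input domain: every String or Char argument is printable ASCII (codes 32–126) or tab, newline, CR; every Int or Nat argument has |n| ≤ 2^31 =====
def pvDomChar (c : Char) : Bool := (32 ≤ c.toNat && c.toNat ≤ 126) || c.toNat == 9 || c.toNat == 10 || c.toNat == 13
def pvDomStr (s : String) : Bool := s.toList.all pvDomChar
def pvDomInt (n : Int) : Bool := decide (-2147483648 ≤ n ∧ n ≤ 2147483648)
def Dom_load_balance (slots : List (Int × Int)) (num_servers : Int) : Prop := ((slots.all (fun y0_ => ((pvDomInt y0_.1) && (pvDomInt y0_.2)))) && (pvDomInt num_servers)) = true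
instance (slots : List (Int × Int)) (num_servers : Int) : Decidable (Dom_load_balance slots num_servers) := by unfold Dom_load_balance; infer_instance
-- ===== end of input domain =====

-- B replaces A's per-slot min()+index() scan with a priority queue kept as an ascending sorted list of
-- (load, server) pairs (pop head, ordered re-insert) and a first-index dict built once (objective: alternative).


-- ===== PORT A =====
-- A's `current_access_time.index(min(current_access_time))`
def pvLeastA (current : List Int) : Nat :=
  ((PySem.List.min? current (fun y => y)).bind (fun m => PySem.List.index? current m)).getD 0

-- total_access_time / target_access_time are computed by A but never used; their only effect is the
-- ZeroDivisionError at num_servers = 0, which Pre_ excludes, so they are not re-computed here.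
def load_balance (slots : List (Int × Int)) (num_servers : Int) : List Int :=
  ((PySem.List.sorted slots (fun x => x.2) true).foldl
    (fun (st : List Int × List Int) slot =>
      let least := pvLeastA st.1
      (st.1.set least (st.1.getD least 0 + slot.2),
       st.2.set ((PySem.List.index? slots slot).getD 0) (least : Int)))
    (List.replicate num_servers.toNat 0, List.replicate slots.length (-1))).2

-- ===== PORT B =====
-- Source B: first = {} ; for i, s in enumerate(slots): if s not in first: first[s] = i
def pvFirstIndex (slots : List (Int × Int)) : PySem.Dict (Int × Int) Int :=
  (PySem.List.enumerate slots).foldl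
    (fun d p => if d.contains p.2 then d else d.insert p.2 p.1) PySem.Dict.empty

-- Python tuple comparison `rest[j] < new` (lexicographic on Int × Int)
def pvLt (a b : Int × Int) : Bool := decide (a.1 < b.1 ∨ (a.1 = b.1 ∧ a.2 < b.2))

-- Source B's hand-rolled bisect_left: `lo, hi = 0, len(rest); while lo < hi: mid = (lo+hi)//2; ...`
-- lo and hi stay in 0..len(rest), so Nat with Nat division is exact for Python's int and //
-- (mid = (lo + hi) / 2 is written inline; fuel ≥ hi - lo only makes the loop structurally
-- terminating — each step shrinks hi - lo by at least one, so the fuel never runs out)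
def pvBisect (rest : List (Int × Int)) (new : Int × Int) (fuel lo hi : Nat) : Nat :=
  match fuel with
  | 0 => lo
  | fuel + 1 =>
    if lo < hi then
      if pvLt (rest.getD ((lo + hi) / 2) (0, 0)) new then pvBisect rest new fuel ((lo + hi) / 2 + 1) hi
      else pvBisect rest new fuel lo ((lo + hi) / 2)
    else lo

-- `rest.insert(lo, new)` with 0 ≤ lo ≤ len(rest)
def pvInsert (rest : List (Int × Int)) (new : Int × Int) : List (Int × Int) :=
  rest.take (pvBisect rest new rest.length 0 rest.length) ++
    new :: rest.drop (pvBisect rest new rest.length 0 rest.length)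

def load_balance_alt (slots : List (Int × Int)) (num_servers : Int) : List Int :=
  let first := pvFirstIndex slots
  -- queue = [(0, i) for i in range(num_servers)]
  ((PySem.List.sorted slots (fun x => x.2) true).foldl
    (fun (st : List (Int × Int) × List Int) slot =>
      let hd := st.1.headD (0, 0)   -- queue[0]; nonempty on every input Pre_ admits
      (pvInsert st.1.tail (hd.1 + slot.2, hd.2),
       st.2.set ((first.getD slot 0).toNat) hd.2))   -- first[slot] is a valid nonnegative index
    ((PySem.List.pyRange 0 num_servers).map (fun i => ((0 : Int), i)),
     List.replicate slots.length (-1))).2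

-- ===== PRECONDITION & SPEC =====
-- A raises exactly when num_servers = 0 (ZeroDivisionError) or num_servers < 0 with nonempty slots
-- (min of the empty server list, ValueError); Pre_ admits precisely the inputs where A returns.
def Pre_load_balance (slots : List (Int × Int)) (num_servers : Int) : Prop :=
  0 < num_servers ∨ (num_servers < 0 ∧ slots = [])
instance (slots : List (Int × Int)) (num_servers : Int) : Decidable (Pre_load_balance slots num_servers) := by unfold Pre_load_balance; infer_instance
def pvWitness_load_balance : (List (Int × Int)) × Int := ([(0, 1), (1, 2), (2, 2)], 2)

def Spec_load_balance (slots : List (Int × Int)) (num_servers : Int) (out : List Int) : Prop := out = load_balance_alt slots num_servers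
instance (slots : List (Int × Int)) (num_servers : Int) (out : List Int) : Decidable (Spec_load_balance slots num_servers out) := by unfold Spec_load_balance; infer_instance

-- ===== CLAIM (what is proved, stated in full; the proofs are below) =====
def Claim_equal_load_balance : Prop := ∀ (slots : List (Int × Int)) (num_servers : Int), Dom_load_balance slots num_servers → Pre_load_balance slots num_servers → Spec_load_balance slots num_servers (load_balance slots num_servers)

-- ===== LEMMAS AND PROOFS =====

-- queue invariant: ascending sorted, and its members are exactly the (load, server) pairs of cur
def pvQ (cur : List Int) (q : List (Int × Int)) : Prop :=
  q.Pairwise (fun a b => pvLt a b = true) ∧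
  (∀ p : Int × Int, p ∈ q ↔ ∃ (i : Nat) (h : i < cur.length), p = (cur[i], (i : Int)))

theorem pvLt_trans {a b c : Int × Int} (h1 : pvLt a b = true) (h2 : pvLt b c = true) :
    pvLt a c = true := by
  simp only [pvLt, decide_eq_true_eq] at *
  rcases h1 with h | ⟨e, h⟩ <;> rcases h2 with h' | ⟨e', h'⟩ <;> omega

theorem pvLt_irrefl (a : Int × Int) : pvLt a a = false := by
  simp [pvLt]

theorem pvLt_of_not {a b : Int × Int} (h : ¬ pvLt a b = true) (hne : a.2 ≠ b.2) :
    pvLt b a = true := by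
  simp only [pvLt, decide_eq_true_eq] at *
  omega

theorem pvBisect_spec (rest : List (Int × Int)) (new : Int × Int)
    (hs : rest.Pairwise (fun a b => pvLt a b = true)) :
    ∀ (k lo hi : Nat), hi - lo ≤ k → lo ≤ hi → hi ≤ rest.length →
      (∀ (i : Nat) (h : i < rest.length), i < lo → pvLt rest[i] new = true) →
      (∀ (i : Nat) (h : i < rest.length), hi ≤ i → pvLt rest[i] new = false) →
      pvBisect rest new k lo hi ≤ rest.length ∧
      (∀ (i : Nat) (h : i < rest.length), i < pvBisect rest new k lo hi → pvLt rest[i] new = true) ∧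
      (∀ (i : Nat) (h : i < rest.length), pvBisect rest new k lo hi ≤ i → pvLt rest[i] new = false) := by
  intro k
  induction k with
  | zero =>
    intro lo hi hk hle hlen pre suf
    have heq : lo = hi := by omega
    simp only [pvBisect]
    exact ⟨by omega, fun i h hi' => pre i h hi', fun i h hi' => suf i h (by omega)⟩
  | succ k ih =>
    intro lo hi hk hle hlen pre suf
    by_cases hlt : lo < hi
    · simp only [pvBisect]
      rw [if_pos hlt]
      have hmidlt : (lo + hi) / 2 < hi := by omega
      have hmidge : lo ≤ (lo + hi) / 2 := by omega
      have hmidlen : (lo + hi) / 2 < rest.length := by omega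
      rw [List.getD_eq_getElem _ _ hmidlen]
      cases hb : pvLt rest[(lo + hi) / 2] new with
      | true =>
        rw [if_pos rfl]
        refine ih ((lo + hi) / 2 + 1) hi (by omega) (by omega) hlen ?_ suf
        intro i h hi'
        rcases Nat.lt_or_ge i ((lo + hi) / 2) with hcase | hcase
        · exact pvLt_trans
            ((List.pairwise_iff_getElem.mp hs) i ((lo + hi) / 2) h hmidlen hcase) hb
        · have : i = (lo + hi) / 2 := by omega
          subst this; exact hb
      | false =>
        rw [if_neg (by simp)]
        refine ih lo ((lo + hi) / 2) (by omega) (by omega) (by omega) pre ?_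
        intro i h hi'
        rcases Nat.lt_or_ge ((lo + hi) / 2) i with hcase | hcase
        · cases hb' : pvLt rest[i] new with
          | false => rfl
          | true =>
            exact absurd (pvLt_trans
              ((List.pairwise_iff_getElem.mp hs) ((lo + hi) / 2) i hmidlen h hcase) hb')
              (by simp [hb])
        · have : i = (lo + hi) / 2 := by omega
          subst this; exact hb
    · simp only [pvBisect]
      rw [if_neg hlt]
      exact ⟨by omega, fun i h hi' => pre i h hi',
        fun i h hi' => suf i h (by omega)⟩

theorem mem_pvInsert (rest : List (Int × Int)) (new p : Int × Int) :
    p ∈ pvInsert rest new ↔ p = new ∨ p ∈ rest := by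
  rw [pvInsert]
  conv_rhs => rw [← List.take_append_drop (pvBisect rest new rest.length 0 rest.length) rest]
  simp only [List.mem_append, List.mem_cons]
  tauto

theorem pairwise_pvInsert (rest : List (Int × Int)) (new : Int × Int)
    (hs : rest.Pairwise (fun a b => pvLt a b = true))
    (hd : ∀ x ∈ rest, x.2 ≠ new.2) :
    (pvInsert rest new).Pairwise (fun a b => pvLt a b = true) := by
  obtain ⟨hjle, hpre, hsuf⟩ := pvBisect_spec rest new hs rest.length 0 rest.length
    (by omega) (by omega) le_rfl
    (fun i h hi' => absurd hi' (Nat.not_lt_zero i))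
    (fun i h hi' => absurd h (by omega))
  rw [pvInsert, List.pairwise_append]
  have htk : ∀ a ∈ rest.take (pvBisect rest new rest.length 0 rest.length),
      ∃ (i : Nat) (h : i < rest.length), i < pvBisect rest new rest.length 0 rest.length ∧ a = rest[i] := by
    intro a ha
    obtain ⟨i, hlt, heq⟩ := List.mem_iff_getElem.mp ha
    rw [List.getElem_take] at heq
    rw [List.length_take] at hlt
    exact ⟨i, by omega, by omega, heq.symm⟩
  have hdr : ∀ b ∈ rest.drop (pvBisect rest new rest.length 0 rest.length),
      ∃ (i : Nat) (h : i < rest.length), pvBisect rest new rest.length 0 rest.length ≤ i ∧ b = rest[i] := by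
    intro b hb
    obtain ⟨i, hlt, heq⟩ := List.mem_iff_getElem.mp hb
    rw [List.getElem_drop] at heq
    rw [List.length_drop] at hlt
    exact ⟨pvBisect rest new rest.length 0 rest.length + i, by omega, by omega, heq.symm⟩
  refine ⟨List.Pairwise.sublist (List.take_sublist _ _) hs, ?_, ?_⟩
  · rw [List.pairwise_cons]
    refine ⟨?_, List.Pairwise.sublist (List.drop_sublist _ _) hs⟩
    intro x hx
    obtain ⟨i, h, hge, rfl⟩ := hdr x hx
    exact pvLt_of_not (by simp [hsuf i h hge]) (hd _ (List.getElem_mem h))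
  · intro a ha b hb
    obtain ⟨i, h, hilt, rfl⟩ := htk a ha
    rcases List.mem_cons.mp hb with rfl | hbd
    · exact hpre i h hilt
    · obtain ⟨i', h', hge, rfl⟩ := hdr b hbd
      exact (List.pairwise_iff_getElem.mp hs) i i' h h' (by omega)

-- the head of the queue is (min load, first server index attaining it), i.e. A's selection
theorem pvHead_eq {cur : List Int} {q : List (Int × Int)} {m : Int} {j : Nat}
    (hQ : pvQ cur q)
    (hm : PySem.List.min? cur (fun y => y) = some m)
    (hj : PySem.List.index? cur m = some j) :
    q.headD (0, 0) = (m, (j : Int)) := by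
  obtain ⟨hjlt, hjval, hjfirst⟩ := PySem.List.getElem_of_index?_eq_some hj
  have hmem : ((m, (j : Int)) : Int × Int) ∈ q :=
    (hQ.2 _).mpr ⟨j, hjlt, by rw [hjval]⟩
  cases q with
  | nil => exact absurd hmem (by simp)
  | cons h t =>
    have hpw := List.pairwise_cons.mp hQ.1
    rcases List.mem_cons.mp hmem with heq | hmt
    · simp [← heq]
    · exfalso
      have hlt : pvLt h (m, (j : Int)) = true := hpw.1 _ hmt
      obtain ⟨i, hilt, hieq⟩ := (hQ.2 h).mp (List.mem_cons_self)
      have hmin : m ≤ cur[i] := PySem.List.min?_isMin hm _ (List.getElem_mem hilt)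
      simp only [pvLt, decide_eq_true_eq, hieq] at hlt
      rcases hlt with hlt | ⟨heq, hlt⟩
      · omega
      · have : i < j := by exact_mod_cast hlt
        exact hjfirst i this heq

theorem pvQ_ne_nil {cur : List Int} {q : List (Int × Int)} (hQ : pvQ cur q)
    (hne : cur ≠ []) : q ≠ [] := by
  intro h
  subst h
  have h0 : 0 < cur.length := List.length_pos_iff.mpr hne
  exact absurd ((hQ.2 _).mpr ⟨0, h0, rfl⟩) (by simp)

-- invariant preservation for one greedy step
theorem pvQ_step {cur : List Int} {q : List (Int × Int)} {m : Int} {j : Nat} (w : Int)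
    (hQ : pvQ cur q)
    (hm : PySem.List.min? cur (fun y => y) = some m)
    (hj : PySem.List.index? cur m = some j) :
    pvQ (cur.set j (m + w)) (pvInsert q.tail (m + w, (j : Int))) := by
  obtain ⟨hjlt, hjval, _⟩ := PySem.List.getElem_of_index?_eq_some hj
  have hne : cur ≠ [] := by intro h; subst h; simp at hjlt
  obtain ⟨h, t, rfl⟩ : ∃ h t, q = h :: t := by
    cases q with
    | nil => exact absurd rfl (pvQ_ne_nil hQ hne)
    | cons h t => exact ⟨h, t, rfl⟩
  have hhead : (h :: t).headD (0, 0) = (m, (j : Int)) := pvHead_eq hQ hm hj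
  have hh : h = (m, (j : Int)) := by simpa using hhead
  subst hh
  have hpw := List.pairwise_cons.mp hQ.1
  have hsnd : ∀ x ∈ t, x.2 ≠ ((m + w, (j : Int)) : Int × Int).2 := by
    intro x hx hx2
    obtain ⟨i, hilt, hieq⟩ := (hQ.2 x).mp (List.mem_cons_of_mem _ hx)
    have hij : i = j := by
      have : (i : Int) = (j : Int) := by rw [hieq] at hx2; exact hx2
      exact_mod_cast this
    subst hij
    have := hpw.1 x hx
    rw [hieq, hjval] at this
    simp [pvLt_irrefl] at this
  constructor
  · exact pairwise_pvInsert t _ hpw.2 hsnd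
  · intro p
    rw [mem_pvInsert]
    constructor
    · rintro (rfl | hp)
      · exact ⟨j, by simpa using hjlt, by simp [List.getElem_set_self]⟩
      · obtain ⟨i, hilt, hieq⟩ := (hQ.2 p).mp (List.mem_cons_of_mem _ hp)
        have hij : i ≠ j := by
          intro hij
          subst hij
          rw [hjval] at hieq
          have := hpw.1 p hp
          rw [hieq] at this
          simp [pvLt_irrefl] at this
        exact ⟨i, by simpa using hilt, by rw [hieq, List.getElem_set_ne (fun hh => hij hh.symm)]⟩
    · rintro ⟨i, hilt, hieq⟩
      have hilt' : i < cur.length := by simpa using hilt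
      by_cases hij : i = j
      · subst hij
        left
        rw [hieq, List.getElem_set_self]
      · right
        refine (List.mem_cons.mp ((hQ.2 p).mpr ⟨i, hilt', by
          rw [hieq, List.getElem_set_ne (fun hh => hij hh.symm)]⟩)).resolve_left ?_
        intro hpj
        apply hij
        have : (i : Int) = (j : Int) := by rw [hieq] at hpj; exact congrArg Prod.snd hpj
        exact_mod_cast this

theorem pvFi_fold (xs : List (Int × Int)) (v : Int × Int) :
    ∀ (s : Int) (d : PySem.Dict (Int × Int) Int),
      ((PySem.List.enumerate xs s).foldl
        (fun d p => if d.contains p.2 then d else d.insert p.2 p.1) d).get? v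
      = if d.contains v then d.get? v
        else (PySem.List.index? xs v).map (fun k => (k : Int) + s) := by
  induction xs with
  | nil => intro s d; simp [PySem.List.enumerate, PySem.Dict.get?_eq_none_iff_contains]
  | cons x xs ih =>
    intro s d
    rw [PySem.List.enumerate_cons, List.foldl_cons]
    by_cases hvx : v = x
    · subst hvx
      by_cases hc : d.contains v
      · rw [if_pos hc, ih, if_pos hc, if_pos hc]
      · rw [if_neg hc, ih, if_neg hc, if_pos (by simp),
          PySem.Dict.get?_insert_self, PySem.List.index?_cons_self]
        simp
    · have hxv : x ≠ v := fun h => hvx h.symm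
      rw [PySem.List.index?_cons_of_ne _ hxv]
      by_cases hc : d.contains x
      · rw [if_pos hc, ih]
        by_cases hcv : d.contains v
        · rw [if_pos hcv, if_pos hcv]
        · rw [if_neg hcv, if_neg hcv]
          cases PySem.List.index? xs v
          · simp
          · simp; ring
      · rw [if_neg hc, ih]
        have hcont : (d.insert x s).contains v = d.contains v := by
          simp [PySem.Dict.contains_insert, hvx]
        rw [hcont]
        by_cases hcv : d.contains v
        · rw [if_pos hcv, if_pos hcv, PySem.Dict.get?_insert_of_ne _ _ hvx]
        · rw [if_neg hcv, if_neg hcv]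
          cases PySem.List.index? xs v
          · simp
          · simp; ring

theorem pvFi_getD {slots : List (Int × Int)} {v : Int × Int} {k : Nat}
    (h : PySem.List.index? slots v = some k) :
    (pvFirstIndex slots).getD v 0 = (k : Int) := by
  rw [pvFirstIndex, PySem.Dict.getD_eq_get?_getD, pvFi_fold,
    if_neg (by simp [PySem.Dict.contains_empty]), h]
  simp

-- the main loop correspondence: A's (loads, out) fold and B's (queue, out) fold keep equal outputs
theorem pvMain (slots : List (Int × Int)) :
    ∀ (s : List (Int × Int)), (∀ x ∈ s, x ∈ slots) →
    ∀ (cur : List Int) (q : List (Int × Int)) (out : List Int),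
      cur ≠ [] → pvQ cur q →
      (s.foldl
        (fun (st : List Int × List Int) slot =>
          let least := pvLeastA st.1
          (st.1.set least (st.1.getD least 0 + slot.2),
           st.2.set ((PySem.List.index? slots slot).getD 0) (least : Int)))
        (cur, out)).2
      = (s.foldl
        (fun (st : List (Int × Int) × List Int) slot =>
          let hd := st.1.headD (0, 0)
          (pvInsert st.1.tail (hd.1 + slot.2, hd.2),
           st.2.set (((pvFirstIndex slots).getD slot 0).toNat) hd.2))
        (q, out)).2 := by
  intro s
  induction s with
  | nil => intro _ cur q out _ _; rfl
  | cons slot rest ih =>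
    intro hmem cur q out hne hQ
    obtain ⟨m, hm⟩ : ∃ m, PySem.List.min? cur (fun y => y) = some m := by
      cases hmc : PySem.List.min? cur (fun y => y) with
      | none => exact absurd ((PySem.List.min?_eq_none_iff cur _).mp hmc) hne
      | some m => exact ⟨m, rfl⟩
    obtain ⟨j, hj⟩ : ∃ j, PySem.List.index? cur m = some j := by
      cases hjc : PySem.List.index? cur m with
      | none =>
        rw [PySem.List.index?_eq_none_iff] at hjc
        exact absurd (PySem.List.min?_mem hm) hjc
      | some j => exact ⟨j, rfl⟩
    obtain ⟨k, hk⟩ : ∃ k, PySem.List.index? slots slot = some k := by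
      cases hkc : PySem.List.index? slots slot with
      | none =>
        rw [PySem.List.index?_eq_none_iff] at hkc
        exact absurd (hmem slot List.mem_cons_self) hkc
      | some k => exact ⟨k, rfl⟩
    obtain ⟨hjlt, hjval, _⟩ := PySem.List.getElem_of_index?_eq_some hj
    have hleast : pvLeastA cur = j := by rw [pvLeastA, hm, Option.bind_some, hj]; rfl
    have hhead : q.headD (0, 0) = (m, (j : Int)) := pvHead_eq hQ hm hj
    have hgetD : cur.getD j 0 = m := by rw [List.getD_eq_getElem _ _ hjlt, hjval]
    simp only [List.foldl_cons]
    rw [hleast, hhead, hgetD, pvFi_getD hk, hk]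
    simp only [Option.getD_some, Int.toNat_natCast]
    exact ih (fun x hx => hmem x (List.mem_cons_of_mem _ hx))
      (cur.set j (m + slot.2)) (pvInsert q.tail (m + slot.2, (j : Int))) _
      (by intro hh
          have hl := congrArg List.length hh
          simp at hl
          exact hne hl)
      (pvQ_step slot.2 hQ hm hj)

-- initial queue [(0,0),(0,1),…] satisfies the invariant for loads = replicate k 0
theorem pvQ_init (ns : Int) (hns : 0 < ns) :
    pvQ (List.replicate ns.toNat 0)
      ((PySem.List.pyRange 0 ns).map (fun i => ((0 : Int), i))) := by
  constructor
  · exact List.Pairwise.map _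
      (fun a b h => by simp [pvLt]; omega)
      (PySem.List.pairwise_lt_pyRange_one 0 ns)
  · intro p
    simp only [List.mem_map, PySem.List.mem_pyRange_one]
    constructor
    · rintro ⟨i, ⟨hi0, hilt⟩, rfl⟩
      refine ⟨i.toNat, by simp; omega, ?_⟩
      simp [List.getElem_replicate, Int.toNat_of_nonneg hi0]
    · rintro ⟨i, hilt, rfl⟩
      refine ⟨(i : Int), ⟨by positivity, ?_⟩, ?_⟩
      · simp at hilt; omega
      · simp [List.getElem_replicate]

-- ===== VERDICT (by name: the statement is the Claim_ definition above) =====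
theorem load_balance_spec : Claim_equal_load_balance := by
  intro slots ns _ hpre
  unfold Spec_load_balance
  by_cases hnil : slots = []
  · subst hnil; rfl
  · have hns : 0 < ns := by
      rcases hpre with h | ⟨_, he⟩
      · exact h
      · exact absurd he hnil
    rw [load_balance, load_balance_alt]
    exact pvMain slots (PySem.List.sorted slots (fun x => x.2) true)
      (fun x hx => (PySem.List.mem_sorted slots _ true x).mp hx)
      (List.replicate ns.toNat 0) _ (List.replicate slots.length (-1))
      (by simp [List.replicate_eq_nil_iff]; omega)
      (pvQ_init ns hns)
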